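-- pv_equiv track=rewrite | github.com/ravikiran437/gfg | Difficulty: Medium/Valid Compressed String/valid-compressed-string.py | checkCompressed
-- ===== SOURCE A (Python) =====
-- def checkCompressed(s, t):
--     # code here
--     p = ""
--     a = ""
--     for i in t:
--         if i.isdigit():
--             p += i
--         else:
--             if p!="":
--                 a += "-"*int(p)
--                 a += i
--                 p = ""
--             else:
--                 a += i
--     if p!="":
--         a += "-"*int(p)
--     if len(s) != len(a):
--         return 0
--     for i in range(len(s)):
--         if a[i] != "-" and s[i] != a[i]:
--             return 0
--     return 1
-- ===== SOURCE B (Python) =====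
-- def checkCompressed(s, t):
--     # single pass over t with a pointer into s; never builds the expanded pattern
--     n = len(s)
--     j = 0
--     num = 0
--     for c in t:
--         if c.isdigit():
--             num = num * 10 + (ord(c) - 48)
--         else:
--             j += num
--             num = 0
--             if j >= n:
--                 return 0
--             if c != '-' and s[j] != c:
--                 return 0
--             j += 1
--     return 1 if j + num == n else 0
-- ===== Notes on version B (the rewrite author's own statement) =====
-- stated objective: faster
-- what changed: B never materializes the decompressed pattern: it scans t once keeping a running digit count and a pointer into s (skipping count positions as wildcards), instead of A's building the expanded string and then comparing it position by position.
import Mathlib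
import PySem

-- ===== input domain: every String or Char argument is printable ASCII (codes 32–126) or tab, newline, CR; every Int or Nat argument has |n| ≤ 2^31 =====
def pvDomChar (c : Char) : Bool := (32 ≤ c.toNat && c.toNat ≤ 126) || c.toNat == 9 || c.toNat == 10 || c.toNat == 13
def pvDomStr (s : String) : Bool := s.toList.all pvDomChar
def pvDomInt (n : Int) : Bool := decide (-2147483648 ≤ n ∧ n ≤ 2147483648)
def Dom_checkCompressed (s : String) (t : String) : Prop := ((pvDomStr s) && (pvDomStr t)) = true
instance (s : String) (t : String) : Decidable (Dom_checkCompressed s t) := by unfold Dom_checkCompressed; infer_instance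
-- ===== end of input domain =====

-- B replaces A's "expand t, then compare" by a one-pass pointer scan over s; return value equivalence is proved.

-- ===== PORT A =====
-- int(p) on the nonempty all-digit string p (guaranteed by the isdigit guard; exact on ASCII):
def pvValA (p : List Char) : Nat := p.foldl (fun n c => 10 * n + (c.toNat - 48)) 0

-- first loop of A: builds the expanded pattern a (Char.isDigit = Python str.isdigit on the ASCII domain)
def pvExpA : List Char → List Char → List Char → List Char
  | [], p, a => if p ≠ [] then a ++ List.replicate (pvValA p) '-' else a
  | c :: ts, p, a =>
    if c.isDigit then pvExpA ts (p ++ [c]) a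
    else if p ≠ [] then pvExpA ts [] ((a ++ List.replicate (pvValA p) '-') ++ [c])
    else pvExpA ts [] (a ++ [c])

-- second loop of A: i over range(len(s)), comparing s[i] with a[i]; called only with equal
-- lengths, so the simultaneous recursion visits exactly the same pairs in the same order
def pvMatchA : List Char → List Char → Int
  | [], _ => 1
  | _ :: _, [] => 1   -- unreachable: only called with equal lengths
  | x :: xs, y :: ys => if y ≠ '-' ∧ x ≠ y then 0 else pvMatchA xs ys

def checkCompressed (s : String) (t : String) : Int :=
  let sl := s.toList
  let al := pvExpA t.toList [] []
  if sl.length ≠ al.length then 0 else pvMatchA sl al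

-- ===== PORT B =====
-- one pass over t: num = pending digit count, j = pointer into s; early 0 on mismatch/overshoot
def pvAltLoop (sl : List Char) : List Char → Nat → Nat → Int
  | [], j, num => if j + num = sl.length then 1 else 0
  | c :: ts, j, num =>
    if c.isDigit then pvAltLoop sl ts j (num * 10 + (c.toNat - 48))
    else
      if sl.length ≤ j + num then 0
      else if c ≠ '-' ∧ sl.getD (j + num) ' ' ≠ c then 0   -- s[j] after the bounds guard
      else pvAltLoop sl ts (j + num + 1) 0

def checkCompressed_alt (s : String) (t : String) : Int := pvAltLoop s.toList t.toList 0 0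

-- ===== PRECONDITION & SPEC =====
def Spec_checkCompressed (s : String) (t : String) (out : Int) : Prop := out = checkCompressed_alt s t
instance (s : String) (t : String) (out : Int) : Decidable (Spec_checkCompressed s t out) := by unfold Spec_checkCompressed; infer_instance

-- ===== CLAIM (what is proved, stated in full; the proofs are below) =====
def Claim_equal_checkCompressed : Prop := ∀ (s : String) (t : String), Dom_checkCompressed s t → Spec_checkCompressed s t (checkCompressed s t)

-- ===== LEMMAS AND PROOFS =====

-- semantic expansion of t with a pending count k
def pvG : List Char → Nat → List Char
  | [], k => List.replicate k '-'
  | c :: ts, k =>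
    if c.isDigit then pvG ts (10 * k + (c.toNat - 48))
    else List.replicate k '-' ++ c :: pvG ts 0

theorem pvValA_append (p : List Char) (c : Char) :
    pvValA (p ++ [c]) = 10 * pvValA p + (c.toNat - 48) := by
  simp [pvValA]

theorem pvExpA_eq_G (t : List Char) : ∀ p a, pvExpA t p a = a ++ pvG t (pvValA p) := by
  induction t with
  | nil =>
    intro p a
    cases p with
    | nil => simp [pvExpA, pvG, pvValA]
    | cons x xs => simp [pvExpA, pvG]
  | cons c ts ih =>
    intro p a
    by_cases hd : c.isDigit
    · simp [pvExpA, pvG, hd, ih, pvValA_append]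
    · cases p with
      | nil => simp [pvExpA, pvG, hd, ih, pvValA]
      | cons x xs => simp [pvExpA, pvG, hd, ih, pvValA]

theorem pvMatchA_replicate (xs : List Char) : ∀ k, pvMatchA xs (List.replicate k '-') = 1 := by
  induction xs with
  | nil => intro k; simp [pvMatchA]
  | cons x xs ih =>
    intro k
    cases k with
    | zero => rfl
    | succ k => simpa [pvMatchA] using ih k

theorem pvMatchA_skip (k : Nat) : ∀ (xs ys : List Char), k ≤ xs.length →
    pvMatchA xs (List.replicate k '-' ++ ys) = pvMatchA (xs.drop k) ys := by
  induction k with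
  | zero => intro xs ys _; simp
  | succ k ih =>
    intro xs ys h
    cases xs with
    | nil => simp at h
    | cons x xs => simpa [pvMatchA] using ih xs ys (by simpa using h)

theorem pvAltLoop_eq (sl : List Char) (t : List Char) : ∀ j num,
    pvAltLoop sl t j num =
      if j + (pvG t num).length = sl.length then pvMatchA (sl.drop j) (pvG t num) else 0 := by
  induction t with
  | nil =>
    intro j num
    simp only [pvAltLoop, pvG, List.length_replicate]
    split_ifs with h
    · exact (pvMatchA_replicate _ _).symm
    · rfl
  | cons c ts ih =>
    intro j num
    by_cases hd : c.isDigit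
    · simpa [pvAltLoop, pvG, hd, Nat.mul_comm] using ih j (num * 10 + (c.toNat - 48))
    · rw [Bool.not_eq_true] at hd
      simp only [pvAltLoop, pvG, hd, Bool.false_eq_true, if_false]
      by_cases hb : sl.length ≤ j + num
      · have hne : ¬ (j + (List.replicate num '-' ++ c :: pvG ts 0).length = sl.length) := by
          simp only [List.length_append, List.length_replicate, List.length_cons]
          omega
        rw [if_pos hb, if_neg hne]
      · have hblt : j + num < sl.length := by omega
        have hskip : pvMatchA (sl.drop j) (List.replicate num '-' ++ c :: pvG ts 0)
            = pvMatchA (sl.drop (j + num)) (c :: pvG ts 0) := by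
          rw [pvMatchA_skip num (sl.drop j) _ (by simp; omega), List.drop_drop]
        have hdrop : sl.drop (j + num) = sl[j + num]'hblt :: sl.drop (j + num + 1) :=
          List.drop_eq_getElem_cons hblt
        have hgetD : sl.getD (j + num) ' ' = sl[j + num]'hblt := by
          simp [List.getD, List.getElem?_eq_getElem hblt]
        rw [if_neg hb]
        by_cases hc : c ≠ '-' ∧ sl.getD (j + num) ' ' ≠ c
        · have h0 : pvMatchA (sl.drop j) (List.replicate num '-' ++ c :: pvG ts 0) = 0 := by
            rw [hskip, hdrop]
            simp only [pvMatchA]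
            rw [if_pos ⟨hc.1, by rw [← hgetD]; exact hc.2⟩]
          rw [if_pos hc]
          split_ifs with hlen
          · exact h0.symm
          · rfl
        · have hrec : pvMatchA (sl.drop j) (List.replicate num '-' ++ c :: pvG ts 0)
              = pvMatchA (sl.drop (j + num + 1)) (pvG ts 0) := by
            rw [hskip, hdrop]
            simp only [pvMatchA]
            rw [if_neg (by rw [hgetD] at hc; exact hc)]
          have hlen : (j + (List.replicate num '-' ++ c :: pvG ts 0).length = sl.length)
              ↔ (j + num + 1 + (pvG ts 0).length = sl.length) := by
            simp only [List.length_append, List.length_replicate, List.length_cons]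
            omega
          rw [if_neg hc, ih (j + num + 1) 0]
          by_cases h2 : j + num + 1 + (pvG ts 0).length = sl.length
          · rw [if_pos h2, if_pos (hlen.mpr h2), hrec]
          · rw [if_neg h2, if_neg (fun h => h2 (hlen.mp h))]

-- ===== VERDICT (by name: the statement is the Claim_ definition above) =====
theorem checkCompressed_spec : Claim_equal_checkCompressed := by
  intro s t _
  unfold Spec_checkCompressed checkCompressed checkCompressed_alt
  rw [pvAltLoop_eq, pvExpA_eq_G]
  simp only [pvValA, List.foldl_nil, List.nil_append, Nat.zero_add, List.drop_zero]
  split_ifs with h1 h2 <;> first | rfl | omega
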